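-- pv_equiv track=rewrite | github.com/danfromdursley-spec/UV-QDS | data/rotmods_rc/qds_merge_summaries.py | pick_key
-- ===== SOURCE A (Python) =====
-- def norm(s):
--     return (s or "").strip().lower()
--
-- def pick_key(fieldnames, wants):
--     """Pick the first field whose normalized name matches any of 'wants' (exact or contains)."""
--     fns = list(fieldnames or [])
--     nf = [norm(x) for x in fns]
--     for w in wants:
--         w = norm(w)
--         # exact
--         if w in nf:
--             return fns[nf.index(w)]
--         # contains
--         for i, x in enumerate(nf):
--             if w in x:
--                 return fns[i]
--     return None
-- ===== SOURCE B (Python) =====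
-- def norm(s):
--     return (s or "").strip().lower()
--
-- def pick_key(fieldnames, wants):
--     """Pick the first field whose normalized name matches any of 'wants' (exact or contains)."""
--     fns = list(fieldnames or [])
--     nw = [norm(w) for w in wants]
--     best = None  # (score, field); score = (want index, 0 exact / 1 contains, field index)
--     for i, f in enumerate(fns):
--         x = norm(f)
--         for j, w in enumerate(nw):
--             if w == x:
--                 score = (j, 0, i)
--             elif w in x:
--                 score = (j, 1, i)
--             else:
--                 continue
--             if best is None or score < best[0]:
--                 best = (score, f)
--     return best[1] if best is not None else None
-- ===== Notes on version B (the rewrite author's own statement) =====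
-- stated objective: alternative
-- what changed: B replaces A's want-major sequential search with early returns by a field-major exhaustive scan that scores every (field, want) match with a lexicographic (want index, match kind, field index) key and returns the field with the minimal score.
import Mathlib
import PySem

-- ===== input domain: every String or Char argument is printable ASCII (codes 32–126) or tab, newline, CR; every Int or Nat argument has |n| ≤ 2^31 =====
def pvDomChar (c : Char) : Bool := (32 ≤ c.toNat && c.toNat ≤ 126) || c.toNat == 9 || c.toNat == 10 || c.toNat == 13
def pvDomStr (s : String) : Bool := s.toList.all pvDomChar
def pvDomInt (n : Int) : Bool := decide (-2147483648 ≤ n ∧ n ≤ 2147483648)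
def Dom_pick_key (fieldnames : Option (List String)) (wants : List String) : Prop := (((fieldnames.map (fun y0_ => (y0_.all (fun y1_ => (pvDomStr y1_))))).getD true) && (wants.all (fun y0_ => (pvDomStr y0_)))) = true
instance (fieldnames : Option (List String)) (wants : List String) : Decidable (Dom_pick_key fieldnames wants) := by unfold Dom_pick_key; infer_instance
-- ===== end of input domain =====

-- B replaces A's want-major sequential search (early returns) by a field-major exhaustive
-- scan scoring every (field, want) match with a lexicographic key and taking the minimum;
-- alternative decomposition, same results.


-- ===== PORT A =====
-- norm(s) = (s or "").strip().lower(); for a str argument 's or ""' is s itself ("" stays "")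
def pvNorm (s : String) : String := PySem.Str.lower (PySem.Str.strip s)

-- inner 'for i, x in enumerate(nf): if w in x: return fns[i]' — counter i carried explicitly
def pvContLoop (fns : List String) (w : String) : Int → List String → Option String
  | _, [] => none
  | i, x :: rest =>
      if PySem.Str.isIn w x then PySem.List.pyGet? fns i else pvContLoop fns w (i + 1) rest

-- 'for w in wants: …'
def pvLoopA (fns nf : List String) : List String → Option String
  | [] => none
  | w0 :: ws =>
      let w := pvNorm w0
      if nf.contains w then
        (PySem.List.index? nf w).bind (fun i => PySem.List.pyGet? fns (i : Int))
      else
        match pvContLoop fns w 0 nf with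
        | some r => some r
        | none => pvLoopA fns nf ws

def pick_key (fieldnames : Option (List String)) (wants : List String) : Option String :=
  let fns := fieldnames.getD []
  let nf := fns.map pvNorm
  pvLoopA fns nf wants

-- ===== PORT B =====
-- Python tuple '<' on the (want index, kind, field index) score: lexicographic
def pvKeyLt (a b : Int × Int × Int) : Bool :=
  decide (a.1 < b.1) || (a.1 == b.1 && (decide (a.2.1 < b.2.1) || (a.2.1 == b.2.1 && decide (a.2.2 < b.2.2))))

-- 'if best is None or score < best[0]: best = (score, f)'
def pvBetter (best : Option ((Int × Int × Int) × String)) (c : (Int × Int × Int) × String) :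
    Option ((Int × Int × Int) × String) :=
  match best with
  | none => some c
  | some b => if pvKeyLt c.1 b.1 then some c else some b

def pick_key_alt (fieldnames : Option (List String)) (wants : List String) : Option String :=
  let fns := fieldnames.getD []
  let nw := wants.map pvNorm
  let best := (PySem.List.enumerate fns).foldl (fun best p =>
      let x := pvNorm p.2
      (PySem.List.enumerate nw).foldl (fun b q =>
        if q.2 == x then pvBetter b ((q.1, 0, p.1), p.2)
        else if PySem.Str.isIn q.2 x then pvBetter b ((q.1, 1, p.1), p.2)
        else b) best) none
  best.map Prod.snd

-- ===== PRECONDITION & SPEC =====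
def Spec_pick_key (fieldnames : Option (List String)) (wants : List String) (out : Option String) : Prop := out = pick_key_alt fieldnames wants
instance (fieldnames : Option (List String)) (wants : List String) (out : Option String) : Decidable (Spec_pick_key fieldnames wants out) := by unfold Spec_pick_key; infer_instance

-- ===== CLAIM (what is proved, stated in full; the proofs are below) =====
def Claim_equal_pick_key : Prop := ∀ (fieldnames : Option (List String)) (wants : List String), Dom_pick_key fieldnames wants → Spec_pick_key fieldnames wants (pick_key fieldnames wants)

-- ===== LEMMAS AND PROOFS =====

-- first exact match / first substring match, the common reference point
def pvExactF (fns : List String) (w : String) : Option String :=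
  fns.find? (fun f => pvNorm f == w)
def pvContF (fns : List String) (w : String) : Option String :=
  fns.find? (fun f => PySem.Str.isIn w (pvNorm f))

-- A collapsed want-major: per normalized want, first exact field else first containing field
def pvRef (fns : List String) : List String → Option String
  | [] => none
  | w :: ws =>
      match pvExactF fns w with
      | some f => some f
      | none =>
          match pvContF fns w with
          | some f => some f
          | none => pvRef fns ws

-- ---- A-side: pick_key = pvRef ----

lemma pvIndexGet (fns : List String) (w : String) :
    (PySem.List.index? (fns.map pvNorm) w).bind (fun i => PySem.List.pyGet? fns (i : Int))
      = pvExactF fns w := by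
  induction fns with
  | nil => simp [pvExactF, PySem.List.index?]
  | cons a l ih =>
      by_cases h : pvNorm a = w
      · subst h
        rw [List.map_cons, PySem.List.index?_cons_self]
        simp [pvExactF]
      · rw [List.map_cons, PySem.List.index?_cons_of_ne _ h]
        have he : pvExactF (a :: l) w = pvExactF l w := by
          simp [pvExactF, h]
        rw [he, ← ih]
        cases hidx : PySem.List.index? (l.map pvNorm) w with
        | none => simp
        | some k =>
            simp only [Option.map_some, Option.bind_some]
            simp [PySem.List.pyGet?_natCast]

lemma pvContainsExact (fns : List String) (w : String) :
    (fns.map pvNorm).contains w = (pvExactF fns w).isSome := by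
  induction fns with
  | nil => simp [pvExactF]
  | cons a l ih =>
      by_cases h : pvNorm a = w
      · simp [pvExactF, h]
      · simpa [pvExactF, List.find?_cons, h, Ne.symm h] using ih

lemma pvContLoopEq (w : String) :
    ∀ (rest fns : List String) (k : Nat), fns.drop k = rest →
      pvContLoop fns w (k : Int) (rest.map pvNorm) = pvContF rest w := by
  intro rest
  induction rest with
  | nil => intro fns k _; simp [pvContLoop, pvContF]
  | cons r rs ih =>
      intro fns k hd
      have hget : PySem.List.pyGet? fns (k : Int) = some r := by
        rw [PySem.List.pyGet?_natCast]
        have h0 := List.getElem?_drop (xs := fns) (i := k) (j := 0)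
        simp [hd] at h0
        simpa using h0.symm
      have hd' : fns.drop (k + 1) = rs := by
        have h1 : fns.drop (k + 1) = (fns.drop k).drop 1 := by
          rw [List.drop_drop]
        simp [h1, hd]
      by_cases hc : PySem.Chars.isIn w.toList (pvNorm r).toList = true
      · simp [pvContLoop, hc, hget, pvContF, PySem.Str.isIn_eq]
      · have hcf : PySem.Chars.isIn w.toList (pvNorm r).toList = false := by
          simpa using hc
        have hk1 : (k : Int) + 1 = ((k + 1 : Nat) : Int) := by push_cast; ring
        rw [List.map_cons]
        simp only [pvContLoop, PySem.Str.isIn_eq, hcf, Bool.false_eq_true, if_false, hk1]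
        rw [ih fns (k + 1) hd']
        simp [pvContF, PySem.Str.isIn_eq, hcf]

lemma pvAeqRef (fns : List String) (ws : List String) :
    pvLoopA fns (fns.map pvNorm) ws = pvRef fns (ws.map pvNorm) := by
  induction ws with
  | nil => simp [pvLoopA, pvRef]
  | cons w rest ih =>
      rw [List.map_cons, pvLoopA, pvRef]
      by_cases h : (fns.map pvNorm).contains (pvNorm w)
      · rw [if_pos h, pvIndexGet]
        rw [pvContainsExact] at h
        cases hx : pvExactF fns (pvNorm w) with
        | none => rw [hx] at h; simp at h
        | some f => simp
      · rw [if_neg h]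
        rw [pvContainsExact] at h
        cases hx : pvExactF fns (pvNorm w) with
        | some f => rw [hx] at h; simp at h
        | none =>
            have h0 := pvContLoopEq (pvNorm w) fns fns 0 (by simp)
            simp only [Nat.cast_zero] at h0
            rw [h0]
            cases hc : pvContF fns (pvNorm w) with
            | some r => simp
            | none => simpa using ih

-- ---- B-side: candidate list and the min-fold ----

-- kind of match of want w against normalized field x (0 exact, 1 contains, none)
def pvHit (x w : String) : Option Int :=
  if w == x then some 0 else if PySem.Str.isIn w x then some 1 else none

def pvCandsOf (nw : List String) (i : Int) (f : String) : List ((Int × Int × Int) × String) :=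
  (PySem.List.enumerate nw).filterMap (fun q => (pvHit (pvNorm f) q.2).map (fun k => ((q.1, k, i), f)))

def pvCands (fns nw : List String) : List ((Int × Int × Int) × String) :=
  (PySem.List.enumerate fns).flatMap (fun p => pvCandsOf nw p.1 p.2)

lemma pvInnerEq (f : String) (i : Int) :
    ∀ (l : List (Int × String)) (b : Option ((Int × Int × Int) × String)),
      l.foldl (fun b q =>
        if q.2 == pvNorm f then pvBetter b ((q.1, 0, i), f)
        else if PySem.Str.isIn q.2 (pvNorm f) then pvBetter b ((q.1, 1, i), f)
        else b) b
      = (l.filterMap (fun q => (pvHit (pvNorm f) q.2).map (fun k => ((q.1, k, i), f)))).foldl pvBetter b := by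
  intro l
  induction l with
  | nil => intro b; rfl
  | cons q t ih =>
      intro b
      rw [List.foldl_cons]
      by_cases h1 : (q.2 == pvNorm f) = true
      · rw [if_pos h1,
          List.filterMap_cons_some (by unfold pvHit; rw [if_pos h1]; rfl),
          List.foldl_cons]
        exact ih _
      · rw [if_neg h1]
        by_cases h2 : PySem.Str.isIn q.2 (pvNorm f) = true
        · rw [if_pos h2,
            List.filterMap_cons_some (by unfold pvHit; rw [if_neg h1, if_pos h2]; rfl),
            List.foldl_cons]
          exact ih _
        · rw [if_neg h2,
            List.filterMap_cons_none (by unfold pvHit; rw [if_neg h1, if_neg h2]; rfl)]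
          exact ih _

lemma pvOuterEq (nw : List String) :
    ∀ (l : List (Int × String)) (b : Option ((Int × Int × Int) × String)),
      l.foldl (fun b p => (pvCandsOf nw p.1 p.2).foldl pvBetter b) b
      = (l.flatMap (fun p => pvCandsOf nw p.1 p.2)).foldl pvBetter b := by
  intro l
  induction l with
  | nil => intro b; rfl
  | cons p t ih => intro b; simp [List.foldl_cons, List.flatMap_cons, List.foldl_append, ih]

lemma pvBeqFold (fieldnames : Option (List String)) (wants : List String) :
    pick_key_alt fieldnames wants
      = ((pvCands (fieldnames.getD []) (wants.map pvNorm)).foldl pvBetter none).map Prod.snd := by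
  show ((PySem.List.enumerate (fieldnames.getD [])).foldl (fun best p =>
      (PySem.List.enumerate (wants.map pvNorm)).foldl (fun b q =>
        if q.2 == pvNorm p.2 then pvBetter b ((q.1, 0, p.1), p.2)
        else if PySem.Str.isIn q.2 (pvNorm p.2) then pvBetter b ((q.1, 1, p.1), p.2)
        else b) best) none).map Prod.snd = _
  unfold pvCands
  rw [← pvOuterEq]
  congr 1
  apply List.foldl_ext
  intro b p _
  rw [pvInnerEq p.2 p.1]
  rfl

-- ---- order facts about the lexicographic key ----

lemma pvKeyLt_false_antisymm {a b : Int × Int × Int}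
    (h1 : pvKeyLt a b = false) (h2 : pvKeyLt b a = false) : a = b := by
  obtain ⟨a1, a2, a3⟩ := a; obtain ⟨b1, b2, b3⟩ := b
  simp [pvKeyLt] at h1 h2 ⊢
  omega

lemma pvKeyLt_false_trans {a b c : Int × Int × Int}
    (h1 : pvKeyLt a b = false) (h2 : pvKeyLt b c = false) : pvKeyLt a c = false := by
  obtain ⟨a1, a2, a3⟩ := a; obtain ⟨b1, b2, b3⟩ := b; obtain ⟨c1, c2, c3⟩ := c
  simp [pvKeyLt] at h1 h2 ⊢
  omega

lemma pvKeyLt_false_of_lt_ge {a b c : Int × Int × Int}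
    (h1 : pvKeyLt a b = true) (h2 : pvKeyLt a c = false) : pvKeyLt b c = false := by
  obtain ⟨a1, a2, a3⟩ := a; obtain ⟨b1, b2, b3⟩ := b; obtain ⟨c1, c2, c3⟩ := c
  simp [pvKeyLt] at h1 h2 ⊢
  omega

-- ---- the min-fold returns the (unique) minimal-key element ----

lemma pvKeyLt_irrefl (a : Int × Int × Int) : pvKeyLt a a = false := by
  obtain ⟨a1, a2, a3⟩ := a
  simp [pvKeyLt]

lemma pvFoldSome (t : List ((Int × Int × Int) × String)) :
    ∀ b, ∃ p, t.foldl pvBetter (some b) = some p := by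
  induction t with
  | nil => intro b; exact ⟨b, rfl⟩
  | cons c t ih =>
      intro b
      rw [List.foldl_cons]
      show ∃ p, t.foldl pvBetter (pvBetter (some b) c) = some p
      by_cases h : pvKeyLt c.1 b.1 = true
      · rw [show pvBetter (some b) c = some c from by simp [pvBetter, h]]
        exact ih _
      · rw [show pvBetter (some b) c = some b from by simp [pvBetter, h]]
        exact ih _

lemma pvFoldNeNone (l : List ((Int × Int × Int) × String)) (hl : l ≠ []) :
    ∃ p, l.foldl pvBetter none = some p := by
  cases l with
  | nil => exact absurd rfl hl
  | cons c t => exact pvFoldSome t c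

lemma pvFoldChar :
    ∀ (l : List ((Int × Int × Int) × String)) (acc : Option ((Int × Int × Int) × String)) p,
      l.foldl pvBetter acc = some p →
      (acc = some p ∨ p ∈ l) ∧ (∀ q ∈ l, pvKeyLt q.1 p.1 = false) ∧
        (∀ b, acc = some b → pvKeyLt b.1 p.1 = false) := by
  intro l
  induction l with
  | nil =>
      intro acc p h
      simp at h
      subst h
      refine ⟨Or.inl rfl, by simp, ?_⟩
      intro b hb
      injection hb with hb
      subst hb
      exact pvKeyLt_irrefl _
  | cons c t ih =>
      intro acc p h
      rw [List.foldl_cons] at h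
      obtain ⟨hmem, hmin, hacc⟩ := ih (pvBetter acc c) p h
      cases hac : acc with
      | none =>
          have hc' : pvBetter acc c = some c := by rw [hac]; rfl
          rw [hc'] at hmem hacc
          have hcp : pvKeyLt c.1 p.1 = false := hacc c rfl
          refine ⟨?_, ?_, ?_⟩
          · rcases hmem with h1 | h1
            · injection h1 with h1; subst h1; exact Or.inr (List.mem_cons_self ..)
            · exact Or.inr (List.mem_cons_of_mem _ h1)
          · intro q hq
            rcases List.mem_cons.mp hq with h1 | h1
            · rw [h1]; exact hcp
            · exact hmin q h1
          · intro b hb; exact nomatch hb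
      | some b0 =>
          have hsplit : pvBetter acc c = if pvKeyLt c.1 b0.1 then some c else some b0 := by
            rw [hac]; rfl
          by_cases hlt : pvKeyLt c.1 b0.1 = true
          · rw [hsplit, if_pos hlt] at hmem hacc
            have hcp : pvKeyLt c.1 p.1 = false := hacc c rfl
            refine ⟨?_, ?_, ?_⟩
            · rcases hmem with h1 | h1
              · injection h1 with h1; subst h1; exact Or.inr (List.mem_cons_self ..)
              · exact Or.inr (List.mem_cons_of_mem _ h1)
            · intro q hq
              rcases List.mem_cons.mp hq with h1 | h1
              · rw [h1]; exact hcp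
              · exact hmin q h1
            · intro b hb
              injection hb with hb
              subst hb
              exact pvKeyLt_false_of_lt_ge hlt hcp
          · have hlt' : pvKeyLt c.1 b0.1 = false := by simpa using hlt
            rw [hsplit, if_neg (by simp [hlt'])] at hmem hacc
            have hbp : pvKeyLt b0.1 p.1 = false := hacc b0 rfl
            refine ⟨?_, ?_, ?_⟩
            · rcases hmem with h1 | h1
              · exact Or.inl h1
              · exact Or.inr (List.mem_cons_of_mem _ h1)
            · intro q hq
              rcases List.mem_cons.mp hq with h1 | h1
              · rw [h1]; exact pvKeyLt_false_trans hlt' hbp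
              · exact hmin q h1
            · intro b hb
              injection hb with hb
              subst hb
              exact hbp

-- ---- membership in the candidate list ----

lemma pvHit_cases {x w : String} {k : Int} (h : pvHit x w = some k) :
    (k = 0 ∧ w = x) ∨ (k = 1 ∧ w ≠ x ∧ PySem.Str.isIn w x = true) := by
  unfold pvHit at h
  by_cases h1 : (w == x) = true
  · rw [if_pos h1] at h
    injection h with h
    exact Or.inl ⟨h.symm, by simpa using h1⟩
  · rw [if_neg h1] at h
    by_cases h2 : PySem.Str.isIn w x = true
    · rw [if_pos h2] at h
      injection h with h
      exact Or.inr ⟨h.symm, by simpa using h1, h2⟩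
    · rw [if_neg h2] at h
      exact nomatch h

lemma pvMem_cands {fns nw : List String} {c : (Int × Int × Int) × String} :
    c ∈ pvCands fns nw ↔
      ∃ (i : Nat) (hi : i < fns.length) (j : Nat) (hj : j < nw.length) (k : Int),
        pvHit (pvNorm fns[i]) nw[j] = some k ∧ c = (((j : Int), k, (i : Int)), fns[i]) := by
  constructor
  · intro h
    obtain ⟨p, hp, hc⟩ := List.mem_flatMap.mp h
    obtain ⟨i, hi, hpi⟩ := (PySem.List.mem_enumerate_iff _ _ _).mp hp
    obtain ⟨q, hq, hmap⟩ := List.mem_filterMap.mp hc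
    obtain ⟨j, hj, hqj⟩ := (PySem.List.mem_enumerate_iff _ _ _).mp hq
    obtain ⟨k, hk, hck⟩ := Option.map_eq_some_iff.mp hmap
    subst hpi; subst hqj
    simp only at hk hck
    exact ⟨i, hi, j, hj, k, hk, by rw [← hck]; simp⟩
  · rintro ⟨i, hi, j, hj, k, hk, rfl⟩
    apply List.mem_flatMap.mpr
    refine ⟨((i : Int), fns[i]), ?_, ?_⟩
    · exact (PySem.List.mem_enumerate_iff _ _ _).mpr ⟨i, hi, by simp⟩
    · apply List.mem_filterMap.mpr
      refine ⟨((j : Int), nw[j]), ?_, ?_⟩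
      · exact (PySem.List.mem_enumerate_iff _ _ _).mpr ⟨j, hj, by simp⟩
      · simp [hk]

lemma pvCands_key_inj {fns nw : List String} {c d : (Int × Int × Int) × String}
    (hc : c ∈ pvCands fns nw) (hd : d ∈ pvCands fns nw) (h : c.1 = d.1) : c = d := by
  obtain ⟨i, hi, j, hj, k, hk, rfl⟩ := pvMem_cands.mp hc
  obtain ⟨i', hi', j', hj', k', hk', rfl⟩ := pvMem_cands.mp hd
  simp only [Prod.mk.injEq] at h ⊢
  obtain ⟨h1, h2, h3⟩ := h
  have hii : i = i' := by exact_mod_cast h3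
  subst hii
  exact ⟨⟨h1, h2, h3⟩, rfl⟩

-- ---- first-occurrence characterization of find? ----

lemma pvFindFirst {α : Type} (p : α → Bool) (l : List α) (a : α) (h : l.find? p = some a) :
    ∃ (i : Nat) (hi : i < l.length), l[i] = a ∧ p a = true ∧
      ∀ (i' : Nat) (hi' : i' < l.length), i' < i → p l[i'] = false := by
  induction l with
  | nil => simp at h
  | cons x t ih =>
      by_cases hp : p x = true
      · rw [List.find?_cons_of_pos hp] at h
        cases h
        exact ⟨0, by simp, rfl, hp, fun i' _ h' => absurd h' (Nat.not_lt_zero _)⟩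
      · have hp' : p x = false := by simpa using hp
        rw [List.find?_cons_of_neg (by simp [hp'])] at h
        obtain ⟨i, hi, hget, hpa, hfirst⟩ := ih h
        refine ⟨i + 1, by simpa using Nat.succ_lt_succ hi, by simpa using hget, hpa, ?_⟩
        intro i' hi' hlt
        cases i' with
        | zero => simpa using hp'
        | succ m =>
            have hm : m < t.length := by simpa using hi'
            have := hfirst m hm (Nat.lt_of_succ_lt_succ hlt)
            simpa using this

-- ---- characterization of pvRef: its answer is the minimal-key candidate ----

lemma pvRefNone (fns : List String) :
    ∀ (tail nw : List String) (j0 : Nat), nw.drop j0 = tail →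
      pvRef fns tail = none →
      ∀ (j i : Nat) (hj : j < nw.length) (hi : i < fns.length) (k : Int),
        pvHit (pvNorm fns[i]) nw[j] = some k → j < j0 := by
  intro tail
  induction tail with
  | nil =>
      intro nw j0 hd _ j i hj hi k _
      have : nw.length ≤ j0 := by
        have := congrArg List.length hd
        simp [List.length_drop] at this
        omega
      omega
  | cons w rest ih =>
      intro nw j0 hd href j i hj hi k hk
      have hw : nw[j0]? = some w := by
        have h0 := List.getElem?_drop (xs := nw) (i := j0) (j := 0)
        simp [hd] at h0
        simpa using h0.symm
      have hj0 : j0 < nw.length := (List.getElem?_eq_some_iff.mp hw).1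
      have hwv : nw[j0] = w := by
        have := List.getElem?_eq_some_iff.mp hw
        exact this.2
      have hd' : nw.drop (j0 + 1) = rest := by
        have h1 : nw.drop (j0 + 1) = (nw.drop j0).drop 1 := by rw [List.drop_drop]
        simp [h1, hd]
      unfold pvRef at href
      cases hx : pvExactF fns w with
      | some f => rw [hx] at href; simp at href
      | none =>
          rw [hx] at href
          cases hcn : pvContF fns w with
          | some f => rw [hcn] at href; simp at href
          | none =>
              rw [hcn] at href
              by_cases hjj : j = j0
              · subst hjj
                rw [hwv] at hk
                rcases pvHit_cases hk with ⟨_, he⟩ | ⟨_, _, hin⟩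
                · have hno := List.find?_eq_none.mp (by unfold pvExactF at hx; exact hx)
                    fns[i] (List.getElem_mem hi)
                  exact absurd (by rw [he]; exact beq_self_eq_true _) hno
                · have hno := List.find?_eq_none.mp (by unfold pvContF at hcn; exact hcn)
                    fns[i] (List.getElem_mem hi)
                  exact absurd hin hno
              · have := ih nw (j0 + 1) hd' href j i hj hi k hk
                omega

lemma pvRefSome (fns : List String) :
    ∀ (tail nw : List String) (j0 : Nat) (f : String), nw.drop j0 = tail →
      pvRef fns tail = some f →
      ∃ (j i : Nat) (hj : j < nw.length) (hi : i < fns.length) (k : Int),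
        j0 ≤ j ∧ pvHit (pvNorm fns[i]) nw[j] = some k ∧ f = fns[i] ∧
        ∀ (j' i' : Nat) (hj' : j' < nw.length) (hi' : i' < fns.length) (k' : Int),
          j0 ≤ j' → pvHit (pvNorm fns[i']) nw[j'] = some k' →
          pvKeyLt ((j' : Int), k', (i' : Int)) ((j : Int), k, (i : Int)) = false := by
  intro tail
  induction tail with
  | nil => intro nw j0 f _ href; simp [pvRef] at href
  | cons w rest ih =>
      intro nw j0 f hd href
      have hw : nw[j0]? = some w := by
        have h0 := List.getElem?_drop (xs := nw) (i := j0) (j := 0)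
        simp [hd] at h0
        simpa using h0.symm
      have hj0 : j0 < nw.length := (List.getElem?_eq_some_iff.mp hw).1
      have hwv : nw[j0] = w := (List.getElem?_eq_some_iff.mp hw).2
      have hd' : nw.drop (j0 + 1) = rest := by
        have h1 : nw.drop (j0 + 1) = (nw.drop j0).drop 1 := by rw [List.drop_drop]
        simp [h1, hd]
      unfold pvRef at href
      cases hx : pvExactF fns w with
      | some g =>
          rw [hx] at href
          injection href with hgf
          subst hgf
          unfold pvExactF at hx
          obtain ⟨i, hi, hget, hpa, hfirst⟩ := pvFindFirst _ fns g hx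
          have hbeq : (w == pvNorm fns[i]) = true := by
            rw [hget]
            have hgw : pvNorm g = w := by simpa using hpa
            simp [hgw]
          refine ⟨j0, i, hj0, hi, 0, le_refl _, ?_, hget.symm, ?_⟩
          · rw [hwv]; unfold pvHit; rw [if_pos hbeq]
          · intro j' i' hj' hi' k' hge hk'
            by_cases hjj : j' = j0
            · subst hjj
              rw [hwv] at hk'
              rcases pvHit_cases hk' with ⟨hk0, he⟩ | ⟨hk1, _, _⟩
              · subst hk0
                have hii : ¬ i' < i := by
                  intro hlt
                  have h0 := hfirst i' hi' hlt
                  rw [he] at h0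
                  simp at h0
                simp [pvKeyLt]
                omega
              · subst hk1
                simp [pvKeyLt]
            · have : j0 < j' := lt_of_le_of_ne hge (Ne.symm hjj)
              simp [pvKeyLt]
              omega
      | none =>
          rw [hx] at href
          have hex := List.find?_eq_none.mp (by unfold pvExactF at hx; exact hx)
          cases hcn : pvContF fns w with
          | some g =>
              rw [hcn] at href
              injection href with hgf
              subst hgf
              unfold pvContF at hcn
              obtain ⟨i, hi, hget, hpa, hfirst⟩ := pvFindFirst _ fns g hcn
              have hne : ¬ (w = pvNorm fns[i]) := by
                intro he
                exact hex fns[i] (List.getElem_mem hi) (by rw [he]; exact beq_self_eq_true _)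
              refine ⟨j0, i, hj0, hi, 1, le_refl _, ?_, hget.symm, ?_⟩
              · rw [hwv]; unfold pvHit
                rw [if_neg (by simpa using hne), if_pos (by rw [hget]; simpa using hpa)]
              · intro j' i' hj' hi' k' hge hk'
                by_cases hjj : j' = j0
                · subst hjj
                  rw [hwv] at hk'
                  rcases pvHit_cases hk' with ⟨_, he⟩ | ⟨hk1, _, hin⟩
                  · exact absurd
                      (show (pvNorm fns[i'] == w) = true by rw [he]; exact beq_self_eq_true _)
                      (hex fns[i'] (List.getElem_mem hi'))
                  · subst hk1
                    have hii : ¬ i' < i := by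
                      intro hlt
                      have h0 := hfirst i' hi' hlt
                      simp only [PySem.Str.isIn_eq] at h0
                      simp [h0] at hin
                    simp [pvKeyLt]
                    omega
                · have : j0 < j' := lt_of_le_of_ne hge (Ne.symm hjj)
                  simp [pvKeyLt]
                  omega
          | none =>
              rw [hcn] at href
              obtain ⟨j, i, hj, hi, k, hge, hk, hf, hmin⟩ := ih nw (j0 + 1) f hd' href
              have hcont := List.find?_eq_none.mp (by unfold pvContF at hcn; exact hcn)
              refine ⟨j, i, hj, hi, k, by omega, hk, hf, ?_⟩
              intro j' i' hj' hi' k' hge' hk'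
              by_cases hjj : j' = j0
              · exfalso
                subst hjj
                rw [hwv] at hk'
                rcases pvHit_cases hk' with ⟨_, he⟩ | ⟨_, _, hin⟩
                · exact hex fns[i'] (List.getElem_mem hi') (by rw [he]; exact beq_self_eq_true _)
                · exact hcont fns[i'] (List.getElem_mem hi') hin
              · exact hmin j' i' hj' hi' k' (by omega) hk'

-- ===== VERDICT (by name: the statement is the Claim_ definition above) =====
theorem pick_key_spec : Claim_equal_pick_key := by
  intro fieldnames wants _
  unfold Spec_pick_key
  rw [pvBeqFold]
  show pick_key fieldnames wants = _
  unfold pick_key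
  rw [pvAeqRef]
  set fns := fieldnames.getD [] with hfns
  set nw := wants.map pvNorm with hnw
  cases href : pvRef fns nw with
  | none =>
      have hempty : pvCands fns nw = [] := by
        apply List.eq_nil_iff_forall_not_mem.mpr
        intro c hc
        obtain ⟨i, hi, j, hj, k, hk, _⟩ := pvMem_cands.mp hc
        have := pvRefNone fns nw nw 0 (by simp) href j i hj hi k hk
        omega
      rw [hempty]
      rfl
  | some f =>
      obtain ⟨j, i, hj, hi, k, _, hk, hf, hmin⟩ := pvRefSome fns nw nw 0 f (by simp) href
      have hrmem : (((j : Int), k, (i : Int)), fns[i]) ∈ pvCands fns nw :=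
        pvMem_cands.mpr ⟨i, hi, j, hj, k, hk, rfl⟩
      have hne : pvCands fns nw ≠ [] := by
        intro h; rw [h] at hrmem; exact absurd hrmem (List.not_mem_nil)
      obtain ⟨p, hp⟩ := pvFoldNeNone _ hne
      obtain ⟨hpmem, hpmin, _⟩ := pvFoldChar _ none p hp
      have hpmem' : p ∈ pvCands fns nw := by
        rcases hpmem with h1 | h1
        · cases h1
        · exact h1
      -- p's key is minimal (fold), r's key is minimal (ref): keys equal, elements equal
      have h1 : pvKeyLt (((j : Int), k, (i : Int))) p.1 = false :=
        hpmin _ hrmem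
      have h2 : pvKeyLt p.1 (((j : Int), k, (i : Int))) = false := by
        obtain ⟨i', hi', j', hj', k', hk', hpc⟩ := pvMem_cands.mp hpmem'
        have := hmin j' i' hj' hi' k' (Nat.zero_le _) hk'
        rw [hpc]
        exact this
      have hkey : p.1 = (((j : Int), k, (i : Int))) := pvKeyLt_false_antisymm h2 h1
      have hpr : p = (((j : Int), k, (i : Int)), fns[i]) :=
        pvCands_key_inj hpmem' hrmem hkey
      rw [hp, hpr, hf]
      rfl
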